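-- pv_equiv track=rewrite | github.com/DavidCorzo/redes | ipv4_subnetting.py | bits_required_for_num
-- ===== SOURCE A (Python) =====
-- def bits_required_for_num(num):
--     '''
--     Calculates the amount of bits required to store a number given.
--     '''
--     bits = 1
--     q = 0
--     while True:
--         q = pow(2, bits)
--         if q >= num:
--             break
--         else:
--             bits += 1
--     return bits
-- ===== SOURCE B (Python) =====
-- def bits_required_for_num(num):
--     '''
--     Calculates the amount of bits required to store a number given.
--     '''
--     if num <= 2:
--         return 1
--     return (num - 1).bit_length()
-- ===== Notes on version B (the rewrite author's own statement) =====
-- stated objective: idiomatic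
-- what changed: Replaced the unbounded doubling loop with a closed form: smallest bits with 2^bits >= num is 1 for num <= 2 and (num-1).bit_length() otherwise.
import Mathlib
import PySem

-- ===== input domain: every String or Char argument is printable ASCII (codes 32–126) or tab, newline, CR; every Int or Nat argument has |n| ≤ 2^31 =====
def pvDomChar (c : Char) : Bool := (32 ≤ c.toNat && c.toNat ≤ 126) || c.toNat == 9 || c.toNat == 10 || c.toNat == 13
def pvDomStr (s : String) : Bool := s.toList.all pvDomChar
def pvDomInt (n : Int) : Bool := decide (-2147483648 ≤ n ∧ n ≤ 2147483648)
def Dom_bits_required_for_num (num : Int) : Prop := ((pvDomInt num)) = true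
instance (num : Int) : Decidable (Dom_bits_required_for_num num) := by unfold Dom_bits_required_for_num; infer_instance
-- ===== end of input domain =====

-- B replaces A's doubling scan loop by the closed form (num-1).bit_length() (with num ≤ 2 ↦ 1), for idiomatic O(1) code.

-- ===== PORT A =====
-- A's while-loop: bits starts at 1 and only ever increments, so it is carried as a Nat
-- counter and cast to Int at the end; the loop body is transcribed step for step.
def bitsLoopA (num : Int) (bits : Nat) : Nat :=
  let q := (2:Int)^bits
  if q ≥ num then bits
  else bitsLoopA num (bits + 1)
termination_by num.toNat - 2^bits
decreasing_by
  rename_i h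
  simp only [ge_iff_le, not_le] at h
  have h1 : ((2^bits : Nat) : Int) < num := by push_cast; exact h
  have h2 : (2^bits : Nat) < num.toNat := by omega
  have h3 : (2:Nat)^bits < 2^(bits+1) :=
    Nat.pow_lt_pow_right (by norm_num) (Nat.lt_succ_self bits)
  omega

def bits_required_for_num (num : Int) : Int := (bitsLoopA num 1 : Int)

-- ===== PORT B =====
def bits_required_for_num_alt (num : Int) : Int :=
  if num ≤ 2 then 1
  else (PySem.Int.bitLength (num - 1) : Int)

-- ===== PRECONDITION & SPEC =====
def Spec_bits_required_for_num (num : Int) (out : Int) : Prop := out = bits_required_for_num_alt num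
instance (num : Int) (out : Int) : Decidable (Spec_bits_required_for_num num out) := by unfold Spec_bits_required_for_num; infer_instance

-- ===== CLAIM (what is proved, stated in full; the proofs are below) =====
def Claim_equal_bits_required_for_num : Prop := ∀ (num : Int), Dom_bits_required_for_num num → Spec_bits_required_for_num num (bits_required_for_num num)

-- ===== LEMMAS AND PROOFS =====

-- A's loop returns `target` when 2^target covers num and no earlier exponent (from bits on) does.
theorem bitsLoopA_eq_target (num : Int) (bits target : Nat)
    (hle : bits ≤ target)
    (hcov : num ≤ (2:Int)^target)
    (hlt : ∀ j, bits ≤ j → j < target → (2:Int)^j < num) :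
    bitsLoopA num bits = target := by
  induction htd : target - bits generalizing bits with
  | zero =>
      have hbt : bits = target := by omega
      subst hbt
      unfold bitsLoopA
      simp [hcov]
  | succ n ih =>
      have hblt : bits < target := by omega
      have hb : (2:Int)^bits < num := hlt bits le_rfl hblt
      unfold bitsLoopA
      simp only [ge_iff_le, not_le.mpr hb]
      exact ih (bits+1) (by omega) (fun j hj1 hj2 => hlt j (by omega) hj2) (by omega)

theorem bits_required_for_num_spec : Claim_equal_bits_required_for_num := by
  intro num _
  unfold Spec_bits_required_for_num bits_required_for_num bits_required_for_num_alt
  by_cases h2 : num ≤ 2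
  · rw [if_pos h2, bitsLoopA_eq_target num 1 1 le_rfl (by norm_num; omega) (by omega)]
    norm_num
  · rw [if_neg h2]
    push Not at h2
    set L := PySem.Int.bitLength (num - 1) with hL
    have hne : num - 1 ≠ 0 := by omega
    have habs : ((num - 1).natAbs : Int) = num - 1 := Int.natAbs_of_nonneg (by omega)
    have hup : (num - 1).natAbs < 2 ^ L := PySem.Int.lt_two_pow_bitLength (num - 1)
    have hlo : 2 ^ (L - 1) ≤ (num - 1).natAbs := PySem.Int.two_pow_bitLength_le (num - 1) hne
    have habs2 : 2 ≤ (num - 1).natAbs := by omega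
    have hL1 : 1 ≤ L := by
      by_contra hc
      interval_cases L; omega
    have hcov : num ≤ (2:Int)^L := by
      have : ((num - 1).natAbs : Int) < ((2 ^ L : Nat) : Int) := by exact_mod_cast hup
      rw [habs] at this
      push_cast at this
      omega
    have hlt : ∀ j, 1 ≤ j → j < L → (2:Int)^j < num := by
      intro j _ hj
      have hjm : (2:Nat)^j ≤ 2^(L-1) := Nat.pow_le_pow_right (by norm_num) (by omega)
      have : (2:Nat)^j ≤ (num - 1).natAbs := le_trans hjm hlo
      have hc : (((2:Nat)^j : Nat) : Int) ≤ num - 1 := by rw [← habs]; exact_mod_cast this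
      push_cast at hc
      omega
    rw [bitsLoopA_eq_target num 1 L hL1 hcov hlt]
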